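-- pv_equiv track=rewrite | github.com/jetfan-xin/SimultaneousTranslation | experiments/xcomet_4.0/xcomet_eval_all_datasets.py | is_space_or_punct_only_diff
-- ===== SOURCE A (Python) =====
-- import unicodedata
--
-- def is_space_or_punct_only_diff(text_a: str, text_b: str) -> bool:
--     def normalize(text: str) -> str:
--         return "".join(
--             ch for ch in (text or "")
--             if not (ch.isspace() or unicodedata.category(ch).startswith("P"))
--         )
--     if (text_a or "") == (text_b or ""):
--         return False
--     return normalize(text_a) == normalize(text_b)
-- ===== SOURCE B (Python) =====
-- import unicodedata
--
-- def is_space_or_punct_only_diff(text_a: str, text_b: str) -> bool: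
--     if (text_a or "") == (text_b or ""):
--         return False
--     a = text_a or ""
--     b = text_b or ""
--     def drop(ch: str) -> bool:
--         return ch.isspace() or unicodedata.category(ch).startswith("P")
--     i = j = 0
--     while True:
--         while i < len(a) and drop(a[i]):
--             i += 1
--         while j < len(b) and drop(b[j]):
--             j += 1
--         if i >= len(a) or j >= len(b):
--             return i >= len(a) and j >= len(b)
--         if a[i] != b[j]:
--             return False
--         i += 1
--         j += 1
-- ===== Notes on version B (the rewrite author's own statement) =====
-- stated objective: faster
-- what changed: Replaces building two normalized strings and comparing them with a single two-pointer parallel scan that skips space/punctuation characters in place and bails out at the first mismatching surviving character.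
import Mathlib
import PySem

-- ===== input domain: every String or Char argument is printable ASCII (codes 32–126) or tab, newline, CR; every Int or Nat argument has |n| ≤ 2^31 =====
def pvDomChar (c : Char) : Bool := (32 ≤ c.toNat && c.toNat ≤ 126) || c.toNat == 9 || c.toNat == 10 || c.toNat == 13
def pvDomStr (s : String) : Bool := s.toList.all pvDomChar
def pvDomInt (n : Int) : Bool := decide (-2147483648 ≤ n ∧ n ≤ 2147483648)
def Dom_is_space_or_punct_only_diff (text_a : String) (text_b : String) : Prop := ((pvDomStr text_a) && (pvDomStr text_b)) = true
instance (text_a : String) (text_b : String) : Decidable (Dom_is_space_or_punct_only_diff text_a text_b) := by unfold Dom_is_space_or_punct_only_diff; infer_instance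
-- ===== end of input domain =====

-- B replaces A's build-two-normalized-strings-and-compare with a two-pointer parallel scan
-- that skips space/punctuation in place and stops at the first mismatch (objective: faster, constant-factor).


-- unicodedata.category(ch).startswith("P") — ported by hand as the explicit set of ASCII
-- characters of Unicode category P* ; exact on the stated domain (ASCII 32–126, tab, LF, CR).
def pvPunct (c : Char) : Bool :=
  c ∈ ['!', '"', '#', '%', '&', '\'', '(', ')', '*', ',', '-', '.', '/',
       ':', ';', '?', '@', '[', '\\', ']', '_', '{', '}']

-- the shared filter predicate: ch.isspace() or unicodedata.category(ch).startswith("P")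
def pvDrop (c : Char) : Bool := PySem.Chars.isspace c || pvPunct c

-- ===== PORT A =====
-- normalize(text): "".join(ch for ch in text if not (isspace or punct))
def pvNormalize (text : String) : List Char :=
  text.toList.filter (fun ch => !(pvDrop ch))

def is_space_or_punct_only_diff (text_a : String) (text_b : String) : Bool :=
  -- (text_a or "") == (text_b or ""): on Lean Strings this is plain equality
  if text_a == text_b then false
  else pvNormalize text_a == pvNormalize text_b

-- ===== PORT B =====
-- the two-pointer scan from Source B: skip dropped chars on each side, compare survivors
def pvScan : List Char → List Char → Bool
  | [], [] => true
  | [], y :: ys => if pvDrop y then pvScan [] ys else false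
  | x :: xs, ys =>
    if pvDrop x then pvScan xs ys
    else match ys with
      | [] => false
      | y :: ys' => if pvDrop y then pvScan (x :: xs) ys' else x == y && pvScan xs ys'
termination_by xs ys => xs.length + ys.length
decreasing_by all_goals (simp; try omega)

def is_space_or_punct_only_diff_alt (text_a : String) (text_b : String) : Bool :=
  if text_a == text_b then false
  else pvScan text_a.toList text_b.toList

-- ===== PRECONDITION & SPEC =====
def Spec_is_space_or_punct_only_diff (text_a : String) (text_b : String) (out : Bool) : Prop := out = is_space_or_punct_only_diff_alt text_a text_b
instance (text_a : String) (text_b : String) (out : Bool) : Decidable (Spec_is_space_or_punct_only_diff text_a text_b out) := by unfold Spec_is_space_or_punct_only_diff; infer_instance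

-- ===== CLAIM (what is proved, stated in full; the proofs are below) =====
def Claim_equal_is_space_or_punct_only_diff : Prop := ∀ (text_a : String) (text_b : String), Dom_is_space_or_punct_only_diff text_a text_b → Spec_is_space_or_punct_only_diff text_a text_b (is_space_or_punct_only_diff text_a text_b)

-- ===== LEMMAS AND PROOFS =====

-- the two-pointer scan decides equality of the two filtered sequences
theorem pvScan_eq_filter (xs ys : List Char) :
    pvScan xs ys = (xs.filter (fun ch => !(pvDrop ch)) == ys.filter (fun ch => !(pvDrop ch))) := by
  fun_induction pvScan xs ys
  all_goals simp_all [List.filter, List.cons_beq_cons]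

-- ===== VERDICT (by name: the statement is the Claim_ definition above) =====
theorem is_space_or_punct_only_diff_spec : Claim_equal_is_space_or_punct_only_diff := by
  intro ta tb _
  unfold Spec_is_space_or_punct_only_diff is_space_or_punct_only_diff is_space_or_punct_only_diff_alt
  split
  · rfl
  · rw [pvScan_eq_filter]; rfl
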